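-- pv_equiv track=rewrite | github.com/BK-Yoo/algospot | kakao/jmy_q1/answer.py | find_blank_pos_evenly
-- ===== SOURCE A (Python) =====
-- def find_blank_pos_evenly(cur, playlist):
--     if not playlist[cur]:
--         return cur
--
--     else:
--         left, right = None, None
--         for left_idx in range(cur - 1, -1, -1):
--             if not playlist[left_idx]:
--                 left = left_idx
--                 break
--         for right_idx in range(cur + 1, len(playlist)):
--             if not playlist[right_idx]:
--                 right = right_idx
--                 break
--
--         if left is None:
--             return right
--         elif right is None:
--             return left
--         else:
--             # closer to initial position will be selected
--             if cur - left < right - cur: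
--                 return left
--             else:
--                 return right
-- ===== SOURCE B (Python) =====
-- def find_blank_pos_evenly(cur, playlist):
--     if not playlist[cur]:
--         return cur
--     n = len(playlist)
--     for d in range(1, n):
--         r = cur + d
--         if r < n and not playlist[r]:
--             return r
--         l = cur - d
--         if l >= 0 and not playlist[l]:
--             return l
--     return None
-- ===== Notes on version B (the rewrite author's own statement) =====
-- stated objective: simpler
-- what changed: A runs two separate directional scans (left-down, right-up) and then compares the two distances in a four-way case split; B is a single loop over the distance d = 1..len-1 that probes cur+d then cur-d and returns the first blank found, so the distance comparison disappears.
import Mathlib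
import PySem

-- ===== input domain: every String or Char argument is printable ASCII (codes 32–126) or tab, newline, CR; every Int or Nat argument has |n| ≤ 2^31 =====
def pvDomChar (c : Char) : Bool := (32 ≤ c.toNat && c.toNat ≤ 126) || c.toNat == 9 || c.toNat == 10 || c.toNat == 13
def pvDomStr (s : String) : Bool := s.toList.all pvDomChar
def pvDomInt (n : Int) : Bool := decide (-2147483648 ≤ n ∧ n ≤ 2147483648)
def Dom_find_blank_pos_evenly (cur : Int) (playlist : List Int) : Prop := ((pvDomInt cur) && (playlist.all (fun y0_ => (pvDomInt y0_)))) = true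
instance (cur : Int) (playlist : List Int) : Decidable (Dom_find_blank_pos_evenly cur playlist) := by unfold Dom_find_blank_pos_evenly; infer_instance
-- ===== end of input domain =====

-- B replaces A's two separate directional scans + distance comparison by a single loop over the
-- distance d = 1.. that probes right then left; objective: simpler (one loop, no comparison step).

-- truthiness of `not playlist[i]` for an int list: the element exists and equals 0
-- (the .getD 1 default is never used under Pre_, where every probed index is in range)
def pvFalsyAt (playlist : List Int) (i : Int) : Bool :=
  (PySem.List.pyGet? playlist i).getD 1 == 0

-- ===== PORT A =====
-- A's final four-way decision on (left, right)
def pvCombine (cur : Int) (l r : Option Int) : Option Int :=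
  match l, r with
  | none, r => r
  | some l, none => some l
  | some l, some r => if cur - l < r - cur then some l else some r

def find_blank_pos_evenly (cur : Int) (playlist : List Int) : Option Int :=
  if pvFalsyAt playlist cur then some cur
  else
    let left := (PySem.List.pyRange (cur - 1) (-1) (-1)).find? (pvFalsyAt playlist)
    let right := (PySem.List.pyRange (cur + 1) (playlist.length : Int) 1).find? (pvFalsyAt playlist)
    pvCombine cur left right

-- ===== PORT B =====
-- one iteration of B's loop at distance d: probe cur+d, then cur-d
def pvStep (playlist : List Int) (cur d : Int) : Option Int :=
  if cur + d < (playlist.length : Int) ∧ pvFalsyAt playlist (cur + d) then some (cur + d)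
  else if 0 ≤ cur - d ∧ pvFalsyAt playlist (cur - d) then some (cur - d)
  else none

def find_blank_pos_evenly_alt (cur : Int) (playlist : List Int) : Option Int :=
  if pvFalsyAt playlist cur then some cur
  else (PySem.List.pyRange 1 (playlist.length : Int) 1).findSome? (pvStep playlist cur)

-- ===== PRECONDITION & SPEC =====
-- Pre_ excludes exactly the inputs where `playlist[cur]` raises IndexError in A (and in B).
def Pre_find_blank_pos_evenly (cur : Int) (playlist : List Int) : Prop :=
  PySem.Raise.InRange playlist.length cur
instance (cur : Int) (playlist : List Int) : Decidable (Pre_find_blank_pos_evenly cur playlist) := by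
  unfold Pre_find_blank_pos_evenly; infer_instance

def pvWitness_find_blank_pos_evenly : Int × List Int := (1, [7, 3, 0, 5])

def Spec_find_blank_pos_evenly (cur : Int) (playlist : List Int) (out : Option Int) : Prop := out = find_blank_pos_evenly_alt cur playlist
instance (cur : Int) (playlist : List Int) (out : Option Int) : Decidable (Spec_find_blank_pos_evenly cur playlist out) := by unfold Spec_find_blank_pos_evenly; infer_instance

-- ===== CLAIM (what is proved, stated in full; the proofs are below) =====
def Claim_equal_find_blank_pos_evenly : Prop := ∀ (cur : Int) (playlist : List Int), Dom_find_blank_pos_evenly cur playlist → Pre_find_blank_pos_evenly cur playlist → Spec_find_blank_pos_evenly cur playlist (find_blank_pos_evenly cur playlist)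

-- ===== LEMMAS AND PROOFS =====

-- negative-index wraparound of the probe predicate
lemma pvFalsy_wrap (playlist : List Int) (i : Int)
    (h1 : -(playlist.length : Int) ≤ i) (h2 : i < 0) :
    pvFalsyAt playlist i = pvFalsyAt playlist (i + (playlist.length : Int)) := by
  unfold pvFalsyAt PySem.List.pyGet? PySem.List.pyIdx?
  rw [if_neg (by omega), if_pos h1, if_pos (by omega : (0:Int) ≤ i + (playlist.length : Int)),
      if_pos (by omega : i + (playlist.length : Int) < (playlist.length : Int))]
  have : playlist.length - (-i).toNat = (i + (playlist.length : Int)).toNat := by omega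
  rw [this]

-- main lemma for 0 ≤ cur: B's loop from distance d equals A's combination of the two scans from distance d
lemma pvMainPos (playlist : List Int) (cur : Int)
    (hc0 : 0 ≤ cur) (hcn : cur < (playlist.length : Int)) :
    ∀ k : Nat, ∀ d : Int, 1 ≤ d → ((playlist.length : Int) - d).toNat = k →
    pvCombine cur ((PySem.List.pyRange (cur - d) (-1) (-1)).find? (pvFalsyAt playlist))
                  ((PySem.List.pyRange (cur + d) (playlist.length : Int) 1).find? (pvFalsyAt playlist))
    = (PySem.List.pyRange d (playlist.length : Int) 1).findSome? (pvStep playlist cur) := by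
  intro k
  induction k with
  | zero =>
    intro d hd hk
    rw [PySem.List.pyRange_one_eq_nil (show (playlist.length : Int) ≤ d by omega),
        PySem.List.pyRange_one_eq_nil (show (playlist.length : Int) ≤ cur + d by omega),
        PySem.List.pyRange_neg_one_eq_nil (show cur - d ≤ -1 by omega)]
    rfl
  | succ k ih =>
    intro d hd hk
    have hdn : d < (playlist.length : Int) := by omega
    rw [PySem.List.pyRange_one_cons hdn, List.findSome?_cons]
    by_cases hR : cur + d < (playlist.length : Int) ∧ pvFalsyAt playlist (cur + d) = true
    · simp only [pvStep, if_pos hR]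
      rw [PySem.List.pyRange_one_cons hR.1, List.find?_cons_of_pos hR.2]
      cases hL : (PySem.List.pyRange (cur - d) (-1) (-1)).find? (pvFalsyAt playlist) with
      | none => rfl
      | some l =>
        have hm := PySem.List.mem_pyRange_neg_one.mp (List.mem_of_find?_eq_some hL)
        simp only [pvCombine]
        rw [if_neg (show ¬(cur - l < cur + d - cur) by omega)]
    · simp only [pvStep, if_neg hR]
      have hRfind : (PySem.List.pyRange (cur + d) (playlist.length : Int) 1).find? (pvFalsyAt playlist)
          = (PySem.List.pyRange (cur + d + 1) (playlist.length : Int) 1).find? (pvFalsyAt playlist) := by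
        by_cases hlt : cur + d < (playlist.length : Int)
        · have hpf : ¬ pvFalsyAt playlist (cur + d) = true := fun h => hR ⟨hlt, h⟩
          rw [PySem.List.pyRange_one_cons hlt, List.find?_cons_of_neg hpf]
        · rw [PySem.List.pyRange_one_eq_nil (by omega),
              PySem.List.pyRange_one_eq_nil (show (playlist.length : Int) ≤ cur + d + 1 by omega)]
      by_cases hL : 0 ≤ cur - d ∧ pvFalsyAt playlist (cur - d) = true
      · rw [if_pos hL]
        rw [PySem.List.pyRange_neg_one_cons (show (-1:Int) < cur - d by omega), List.find?_cons_of_pos hL.2]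
        rw [hRfind]
        cases hr : (PySem.List.pyRange (cur + d + 1) (playlist.length : Int) 1).find? (pvFalsyAt playlist) with
        | none => rfl
        | some r =>
          have hm := PySem.List.mem_pyRange_one.mp (List.mem_of_find?_eq_some hr)
          simp only [pvCombine]
          rw [if_pos (show cur - (cur - d) < r - cur by omega)]
      · rw [if_neg hL]
        rw [hRfind]
        have hLfind : (PySem.List.pyRange (cur - d) (-1) (-1)).find? (pvFalsyAt playlist)
            = (PySem.List.pyRange (cur - d - 1) (-1) (-1)).find? (pvFalsyAt playlist) := by
          by_cases hge : 0 ≤ cur - d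
          · have hpf : ¬ pvFalsyAt playlist (cur - d) = true := fun h => hL ⟨hge, h⟩
            rw [PySem.List.pyRange_neg_one_cons (show (-1:Int) < cur - d by omega), List.find?_cons_of_neg hpf]
          · rw [PySem.List.pyRange_neg_one_eq_nil (by omega),
                PySem.List.pyRange_neg_one_eq_nil (show cur - d - 1 ≤ -1 by omega)]
        rw [hLfind]
        have h2 := ih (d + 1) (by omega) (by omega)
        rw [show cur - (d + 1) = cur - d - 1 by ring, show cur + (d + 1) = cur + d + 1 by ring] at h2
        exact h2

-- for cur < 0, B's loop body only ever fires its rightward probe: the loop from distance a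
-- is a plain scan of indices cur+a, cur+a+1, …, cur+n-1
lemma pvNegScan (playlist : List Int) (cur : Int) (h2 : cur < 0) :
    ∀ k : Nat, ∀ a : Int, 1 ≤ a → ((playlist.length : Int) - a).toNat = k →
    (PySem.List.pyRange a (playlist.length : Int) 1).findSome? (pvStep playlist cur)
    = (PySem.List.pyRange (cur + a) (cur + (playlist.length : Int)) 1).find? (pvFalsyAt playlist) := by
  intro k
  induction k with
  | zero =>
    intro a ha hk
    rw [PySem.List.pyRange_one_eq_nil (show (playlist.length : Int) ≤ a by omega),
        PySem.List.pyRange_one_eq_nil (show cur + (playlist.length : Int) ≤ cur + a by omega)]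
    rfl
  | succ k ih =>
    intro a ha hk
    have han : a < (playlist.length : Int) := by omega
    rw [PySem.List.pyRange_one_cons han, List.findSome?_cons,
        PySem.List.pyRange_one_cons (show cur + a < cur + (playlist.length : Int) by omega)]
    by_cases hpa : pvFalsyAt playlist (cur + a) = true
    · simp only [pvStep, if_pos (⟨by omega, hpa⟩ : cur + a < (playlist.length : Int) ∧ pvFalsyAt playlist (cur + a) = true)]
      rw [List.find?_cons_of_pos hpa]
    · simp only [pvStep, if_neg (show ¬(cur + a < (playlist.length : Int) ∧ pvFalsyAt playlist (cur + a) = true) from fun h => hpa h.2),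
                 if_neg (show ¬(0 ≤ cur - a ∧ pvFalsyAt playlist (cur - a) = true) from fun h => by omega)]
      rw [List.find?_cons_of_neg hpa]
      have h3 := ih (a + 1) (by omega) (by omega)
      rw [show cur + (a + 1) = cur + a + 1 by ring] at h3
      exact h3

-- main lemma for cur < 0 (Python wraparound): both reduce to a single rightward scan
lemma pvMainNeg (playlist : List Int) (cur : Int)
    (h1 : -(playlist.length : Int) ≤ cur) (h2 : cur < 0)
    (hp : pvFalsyAt playlist cur = false) :
    pvCombine cur ((PySem.List.pyRange (cur - 1) (-1) (-1)).find? (pvFalsyAt playlist))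
                  ((PySem.List.pyRange (cur + 1) (playlist.length : Int) 1).find? (pvFalsyAt playlist))
    = (PySem.List.pyRange 1 (playlist.length : Int) 1).findSome? (pvStep playlist cur) := by
  have hn : (1:Int) ≤ (playlist.length : Int) := by omega
  -- for negative cur the leftward scan range is empty
  rw [PySem.List.pyRange_neg_one_eq_nil (show cur - 1 ≤ -1 by omega)]
  -- B's loop is a rightward scan over [cur+1, cur+n)
  rw [pvNegScan playlist cur h2 ((playlist.length : Int) - 1).toNat 1 (by omega) rfl]
  -- split A's rightward scan [cur+1, n) at cur+n
  rw [show (PySem.List.pyRange (cur + 1) (playlist.length : Int) 1)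
        = PySem.List.pyRange (cur + 1) (cur + (playlist.length : Int)) 1
          ++ PySem.List.pyRange (cur + (playlist.length : Int)) (playlist.length : Int) 1
      from PySem.List.pyRange_one_append _ _ _ (by omega) (by omega)]
  rw [List.find?_append]
  cases hfound : (PySem.List.pyRange (cur + 1) (cur + (playlist.length : Int)) 1).find? (pvFalsyAt playlist) with
  | some v => simp [pvCombine]
  | none =>
    have htail : (PySem.List.pyRange (cur + (playlist.length : Int)) (playlist.length : Int) 1).find? (pvFalsyAt playlist) = none := by
      rw [List.find?_eq_none]
      intro j hj
      have hm := PySem.List.mem_pyRange_one.mp hj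
      have hw := pvFalsy_wrap playlist (j - (playlist.length : Int)) (by omega) (by omega)
      rw [show j - (playlist.length : Int) + (playlist.length : Int) = j by ring] at hw
      rcases eq_or_lt_of_le hm.1 with he | hlt
      · rw [← he, show cur + (playlist.length : Int) - (playlist.length : Int) = cur by ring] at hw
        rw [← he, ← hw]
        simp [hp]
      · have hnone := (List.find?_eq_none.mp hfound) (j - (playlist.length : Int))
          (PySem.List.mem_pyRange_one.mpr ⟨by omega, by omega⟩)
        rw [← hw]
        exact hnone
    simp [htail, pvCombine]

-- ===== VERDICT (by name: the statement is the Claim_ definition above) =====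
theorem find_blank_pos_evenly_spec : Claim_equal_find_blank_pos_evenly := by
  intro cur playlist _ hpre
  unfold Spec_find_blank_pos_evenly find_blank_pos_evenly find_blank_pos_evenly_alt
  by_cases hp : pvFalsyAt playlist cur = true
  · simp [hp]
  · rw [if_neg hp, if_neg hp]
    rcases hpre with ⟨hl, hr⟩
    by_cases hc : 0 ≤ cur
    · exact pvMainPos playlist cur hc hr _ 1 (by omega) rfl
    · exact pvMainNeg playlist cur hl (by omega) (by simpa using hp)
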